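-- pv_equiv track=rewrite | github.com/cristinadece/TwitterCrisis | util/ngrams.py | window
-- ===== SOURCE A (Python) =====
-- from itertools import islice
--
-- def window(seq, n=2):
--     it = iter(seq)
--     result = tuple(islice(it, n))
--     if len(result) == n:
--         yield u' '.join(result)
--     for elem in it:
--         result = result[1:] + (elem,)
--         yield u' '.join(result)
-- ===== SOURCE B (Python) =====
-- def window(seq, n=2):
--     lst = list(seq)
--     for i in range(len(lst) - n + 1):
--         yield ' '.join(lst[i:i+n])
-- ===== Notes on version B (the rewrite author's own statement) =====
-- stated objective: idiomatic
-- what changed: Replaces the rolling-tuple shift over a live iterator with materializing the sequence and taking fresh index-based slices lst[i:i+n].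
-- outside the precondition, e.g. on window(['a', 'b'], 0): A returns ['', 'a', 'b'], B returns ['', '', '']
import Mathlib
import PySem

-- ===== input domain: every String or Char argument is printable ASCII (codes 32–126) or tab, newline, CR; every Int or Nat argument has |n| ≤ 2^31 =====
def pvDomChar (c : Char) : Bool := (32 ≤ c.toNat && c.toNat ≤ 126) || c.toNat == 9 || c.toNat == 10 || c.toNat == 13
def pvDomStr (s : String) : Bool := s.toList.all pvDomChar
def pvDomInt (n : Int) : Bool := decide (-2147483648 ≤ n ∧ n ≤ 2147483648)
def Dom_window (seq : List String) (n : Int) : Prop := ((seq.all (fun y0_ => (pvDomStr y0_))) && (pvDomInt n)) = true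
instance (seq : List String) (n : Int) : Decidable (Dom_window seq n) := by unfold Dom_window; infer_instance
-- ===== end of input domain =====

-- B replaces A's rolling-tuple shift over an iterator with index-based fresh slices
-- over the materialized list (idiomatic; return-value equivalence, both are generators).

-- ===== PORT A =====
-- one loop iteration: result = result[1:] + (elem,); yield ' '.join(result)
def windowStep (st : List String × List String) (elem : String) : List String × List String :=
  (st.1.drop 1 ++ [elem], st.2 ++ [PySem.Str.join " " (st.1.drop 1 ++ [elem])])

def window (seq : List String) (n : Int) : List String :=
  -- result = tuple(islice(it, n)); islice raises ValueError for n < 0 (excluded by Pre_)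
  let result := seq.take n.toNat
  let it := seq.drop n.toNat
  let init := if (result.length : Int) = n then [PySem.Str.join " " result] else []
  (it.foldl windowStep (result, init)).2

-- ===== PORT B =====
def window_alt (seq : List String) (n : Int) : List String :=
  (PySem.List.pyRange 0 ((seq.length : Int) - n + 1) 1).map
    (fun i => PySem.Str.join " " (PySem.List.slice seq (some i) (some (i + n))))

-- ===== PRECONDITION & SPEC =====
-- Pre_ excludes n < 0, where A raises ValueError (islice), and n = 0, where A's output
-- ('' followed by each token singly) is an accident of the rolling-tuple implementation.
def Pre_window (seq : List String) (n : Int) : Prop := 1 ≤ n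
instance (seq : List String) (n : Int) : Decidable (Pre_window seq n) := by unfold Pre_window; infer_instance
def pvWitness_window : List String × Int := (["a", "b", "c"], 2)

def Spec_window (seq : List String) (n : Int) (out : List String) : Prop := out = window_alt seq n
instance (seq : List String) (n : Int) (out : List String) : Decidable (Spec_window seq n out) := by unfold Spec_window; infer_instance

-- ===== CLAIM (what is proved, stated in full; the proofs are below) =====
def Claim_equal_window : Prop := ∀ (seq : List String) (n : Int), Dom_window seq n → Pre_window seq n → Spec_window seq n (window seq n)

-- ===== LEMMAS AND PROOFS =====

-- A's loop: starting from a full window r (|r| = k ≥ 1), the fold emits the join of each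
-- successive k-window of r ++ rest.
lemma foldl_windowStep (k : Nat) (hk : 1 ≤ k) :
    ∀ (rest r acc : List String), r.length = k →
    (rest.foldl windowStep (r, acc)).2
      = acc ++ (List.range rest.length).map
          (fun i => PySem.Str.join " " (((r ++ rest).drop (i + 1)).take k)) := by
  intro rest
  induction rest with
  | nil => intro r acc _; simp
  | cons e rest ih =>
    intro r acc h
    cases r with
    | nil => simp at h; omega
    | cons a r' =>
      have hlen : ((a :: r').drop 1 ++ [e]).length = k := by
        simp at h ⊢; omega
      rw [List.foldl_cons]
      show (rest.foldl windowStep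
        ((a :: r').drop 1 ++ [e], acc ++ [PySem.Str.join " " ((a :: r').drop 1 ++ [e])])).2 = _
      rw [ih _ _ hlen]
      simp only [List.length_cons, List.range_succ_eq_map, List.map_cons, List.map_map]
      have h1 : (r' ++ e :: rest).take k = r' ++ [e] := by
        have hl : (r' ++ [e]).length = k := by simpa using hlen
        rw [show r' ++ e :: rest = (r' ++ [e]) ++ rest by simp, ← hl, List.take_left]
      have h2 : ∀ i : Nat, ((a :: r' ++ e :: rest).drop (i + 1 + 1)).take k
          = (((r' ++ [e]) ++ rest).drop (i + 1)).take k := by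
        intro i
        have : (a :: r' ++ e :: rest).drop (i + 1 + 1) = (r' ++ e :: rest).drop (i + 1) := by
          simp [List.drop_succ_cons]
        rw [this]
        congr 1
        rw [List.append_assoc]
        simp
      simp only [List.drop_succ_cons, List.drop_zero] at *
      simp [h1, Function.comp, List.append_assoc]

theorem window_spec : Claim_equal_window := by
  intro seq n _ hpre
  unfold Pre_window at hpre
  unfold Spec_window window window_alt
  set k := n.toNat with hkdef
  have hnk : (k : Int) = n := Int.toNat_of_nonneg (by omega)
  have hk1 : 1 ≤ k := by omega
  by_cases hlen : k ≤ seq.length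
  · -- full first window exists
    have htake : (seq.take k).length = k := by simp [hlen]
    have hcond : ((seq.take k).length : Int) = n := by rw [htake, hnk]
    simp only [hcond]
    rw [foldl_windowStep k hk1 _ _ _ htake]
    rw [List.take_append_drop]
    have hdl : (seq.drop k).length = seq.length - k := by simp
    -- RHS: unfold pyRange and slices
    rw [PySem.List.pyRange_one]
    have hcount : ((seq.length : Int) - n + 1 - 0).toNat = seq.length - k + 1 := by omega
    rw [hcount]
    have hslice : ∀ j : Nat, PySem.List.slice seq (some ((0 : Int) + (j : Nat)))
        (some ((0 : Int) + (j : Nat) + n)) = (seq.drop j).take k := by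
      intro j
      have : (0 : Int) + (j : Nat) + n = ((j : Nat) : Int) + (k : Nat) := by omega
      rw [this]
      have : (0 : Int) + (j : Nat) = ((j : Nat) : Int) := by omega
      rw [this]
      exact PySem.List.slice_natCast_add seq j k
    simp only [List.map_map]
    have hsplit : seq.length - k + 1 = (seq.length - k) + 1 := rfl
    rw [hsplit, List.range_succ_eq_map, List.map_cons, List.map_map]
    simp only [Function.comp_def, if_true, hdl, List.singleton_append]
    congr 1
    · rw [hslice 0, List.drop_zero]
    · apply List.map_congr_left
      intro i _
      have := hslice (i + 1)
      push_cast at this ⊢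
      rw [this]
  · -- seq shorter than the window: both sides empty
    have htake : (seq.take k).length = seq.length := by simp; omega
    have hcond : ¬ ((seq.take k).length : Int) = n := by rw [htake]; omega
    have hdrop : seq.drop k = [] := by
      apply List.drop_eq_nil_of_le; omega
    simp only [hcond, hdrop, List.foldl_nil]
    rw [PySem.List.pyRange_one_eq_nil (by omega)]
    simp

-- ===== VERDICT (by name: the statement is the Claim_ definition above) =====
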